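-- pv_equiv track=rewrite | github.com/pulp-platform/picobello | experiments/dma_multicast_v2/plot.py | find_monotone_lower_fit
-- ===== SOURCE A (Python) =====
-- def find_monotone_lower_fit(x, y):
--     y_monotone = []
--     x_monotone = []
--     for i, e in enumerate(y):
--         accept = True
--         for j in range(i, len(y)):
--             if y[j] < e:
--                 accept = False
--                 break
--         if accept:
--             y_monotone.append(y[i])
--             x_monotone.append(x[i])
--     return x_monotone, y_monotone
-- ===== SOURCE B (Python) =====
-- def find_monotone_lower_fit(x, y):
--     # One backward pass keeping the running suffix minimum of y;
--     # kept points are exactly those whose y is <= every later y.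
--     keep = []
--     m = None
--     for i, yi in reversed(list(enumerate(y))):
--         if m is None or yi <= m:
--             m = yi
--             keep.append((x[i], yi))
--     keep.reverse()
--     return [p[0] for p in keep], [p[1] for p in keep]
-- ===== Notes on version B (the rewrite author's own statement) =====
-- stated objective: faster
-- what changed: Replaced the O(n^2) inner rescan of the suffix with a single backward pass that maintains the running suffix minimum and keeps the points whose y is <= it.
import Mathlib
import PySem

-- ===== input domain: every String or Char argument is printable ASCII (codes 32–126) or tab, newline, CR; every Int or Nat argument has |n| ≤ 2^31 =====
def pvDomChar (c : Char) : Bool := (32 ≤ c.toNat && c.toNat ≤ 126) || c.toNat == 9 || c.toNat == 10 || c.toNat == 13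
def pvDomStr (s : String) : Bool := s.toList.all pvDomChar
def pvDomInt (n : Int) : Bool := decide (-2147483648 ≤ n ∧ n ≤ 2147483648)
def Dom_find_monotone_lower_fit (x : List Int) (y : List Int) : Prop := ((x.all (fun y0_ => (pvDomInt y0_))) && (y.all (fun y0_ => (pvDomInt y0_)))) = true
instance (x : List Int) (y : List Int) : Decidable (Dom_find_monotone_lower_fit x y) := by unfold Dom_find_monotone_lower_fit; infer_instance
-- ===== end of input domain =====

-- B replaces A's quadratic suffix rescan by one backward pass keeping the running suffix minimum (faster, asymptotic).

-- ===== PORT A =====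
-- inner loop 'for j in range(i, len(y)): if y[j] < e: accept=False; break' scans the suffix y[i:]
def fmlA_inner (e : Int) : List Int → Bool
  | [] => true
  | a :: rest => if a < e then false else fmlA_inner e rest

-- 'for i, e in enumerate(y)' with the two appends
def fmlA_go (x y : List Int) : List (Nat × Int) → List Int × List Int → List Int × List Int
  | [], acc => acc
  | (i, e) :: rest, acc =>
      let accept := fmlA_inner e (y.drop i)
      fmlA_go x y rest
        (if accept then
          (acc.1 ++ [(PySem.List.pyGet? x (i : Int)).getD 0],
           acc.2 ++ [(PySem.List.pyGet? y (i : Int)).getD 0])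
        else acc)

def fmlEnum (i : Nat) : List Int → List (Nat × Int)
  | [] => []
  | a :: t => (i, a) :: fmlEnum (i + 1) t

def find_monotone_lower_fit (x : List Int) (y : List Int) : List Int × List Int :=
  fmlA_go x y (fmlEnum 0 y) ([], [])

-- ===== PORT B =====
-- 'for i, yi in reversed(list(enumerate(y)))' with running minimum m, appending (x[i], yi)
def fmlB_go (x : List Int) : Option Int → List (Int × Int) → List (Int × Int) → List (Int × Int)
  | _, keep, [] => keep.reverse
  | none, keep, (i, yi) :: rest =>
      fmlB_go x (some yi) (keep ++ [((PySem.List.pyGet? x i).getD 0, yi)]) rest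
  | some m, keep, (i, yi) :: rest =>
      if yi ≤ m then fmlB_go x (some yi) (keep ++ [((PySem.List.pyGet? x i).getD 0, yi)]) rest
      else fmlB_go x (some m) keep rest

def find_monotone_lower_fit_alt (x : List Int) (y : List Int) : List Int × List Int :=
  let keep := fmlB_go x none [] (PySem.List.enumerate y).reverse
  (keep.map Prod.fst, keep.map Prod.snd)

-- ===== PRECONDITION & SPEC =====
-- Pre_ excludes exactly the inputs on which A raises IndexError (y non-empty with len(x) < len(y):
-- the last index of y is always accepted, so A evaluates x[i] for some i ≥ len(x)); B raises there too.
def Pre_find_monotone_lower_fit (x : List Int) (y : List Int) : Prop :=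
  y = [] ∨ y.length ≤ x.length
instance (x : List Int) (y : List Int) : Decidable (Pre_find_monotone_lower_fit x y) := by unfold Pre_find_monotone_lower_fit; infer_instance
def pvWitness_find_monotone_lower_fit : List Int × List Int := ([0, 1], [2, 1])

def Spec_find_monotone_lower_fit (x : List Int) (y : List Int) (out : List Int × List Int) : Prop := out = find_monotone_lower_fit_alt x y
instance (x : List Int) (y : List Int) (out : List Int × List Int) : Decidable (Spec_find_monotone_lower_fit x y out) := by unfold Spec_find_monotone_lower_fit; infer_instance

-- ===== CLAIM =====
def Claim_equal_find_monotone_lower_fit : Prop := ∀ (x : List Int) (y : List Int), Dom_find_monotone_lower_fit x y → Pre_find_monotone_lower_fit x y → Spec_find_monotone_lower_fit x y (find_monotone_lower_fit x y)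

-- ===== LEMMAS AND PROOFS =====

-- reference selection: keep a pair iff its second component is ≤ every later second component
def selA {α : Type} : List (α × Int) → List (α × Int)
  | [] => []
  | q :: rest => if rest.all (fun r => q.2 ≤ r.2) then q :: selA rest else selA rest

-- backward form with an upper bound c
def selC {α : Type} (c : Int) : List (α × Int) → List (α × Int)
  | [] => []
  | q :: rest => if q.2 ≤ c ∧ rest.all (fun r => q.2 ≤ r.2) then q :: selC c rest else selC c rest

-- what fmlB_go selects (before mapping through x), without the accumulator
def selB {α : Type} : Option Int → List (α × Int) → List (α × Int)
  | _, [] => []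
  | none, q :: rest => q :: selB (some q.2) rest
  | some c, q :: rest => if q.2 ≤ c then q :: selB (some q.2) rest else selB (some c) rest

theorem fmlA_inner_eq (e : Int) (l : List Int) :
    fmlA_inner e l = l.all (fun a => e ≤ a) := by
  induction l with
  | nil => rfl
  | cons a t ih =>
      simp only [fmlA_inner, List.all_cons]
      by_cases h : a < e
      · simp [h, show ¬ e ≤ a by omega]
      · simp [h, show e ≤ a by omega, ih]

theorem selC_append {α : Type} (c : Int) (p : List (α × Int)) (q : α × Int) :
    selC c (p ++ [q]) = selC (min c q.2) p ++ (if q.2 ≤ c then [q] else []) := by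
  induction p with
  | nil => by_cases h : q.2 ≤ c <;> simp [selC, h]
  | cons r t ih =>
      simp only [List.cons_append, selC, List.all_append, List.all_cons, List.all_nil,
        Bool.and_true]
      rw [ih]
      by_cases hq : r.2 ≤ q.2
      · by_cases hc : r.2 ≤ c
        · simp only [hq, hc, decide_true, Bool.and_true, true_and, le_min_iff, and_true]
          split <;> simp
        · simp [hc, show ¬ r.2 ≤ min c q.2 by omega]
      · have h1 : ¬ r.2 ≤ min c q.2 := by omega
        simp [hq, h1]

theorem selA_append {α : Type} (p : List (α × Int)) (q : α × Int) :
    selA (p ++ [q]) = selC q.2 p ++ [q] := by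
  induction p with
  | nil => simp [selA, selC]
  | cons r t ih =>
      simp only [List.cons_append, selA, selC, List.all_append, List.all_cons, List.all_nil,
        Bool.and_true]
      rw [ih]
      by_cases hq : r.2 ≤ q.2
      · simp only [hq, decide_true, Bool.and_true, true_and]
        split <;> simp
      · simp [hq]

theorem selB_some_reverse {α : Type} (p : List (α × Int)) :
    ∀ c, selB (some c) p.reverse = (selC c p).reverse := by
  induction p using List.reverseRecOn with
  | nil => intro c; rfl
  | append_singleton t q ih =>
      intro c
      rw [List.reverse_append, selC_append]
      simp only [List.reverse_singleton, List.singleton_append, selB]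
      by_cases h : q.2 ≤ c
      · rw [min_eq_right h]
        simp [h, ih]
      · rw [min_eq_left (by omega : c ≤ q.2)]
        simp [h, ih]

theorem selB_none_reverse {α : Type} (p : List (α × Int)) :
    selB none p.reverse = (selA p).reverse := by
  induction p using List.reverseRecOn with
  | nil => rfl
  | append_singleton t q _ =>
      rw [List.reverse_append, selA_append]
      simp only [List.reverse_singleton, List.singleton_append, selB, List.reverse_append,
        selB_some_reverse]

-- fmlB_go accumulates the selB selection of its index list, mapped through x, then reverses
theorem fmlB_go_eq (x : List Int) (l : List (Int × Int)) :
    ∀ cur keep, fmlB_go x cur keep l =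
      (keep ++ (selB cur l).map (fun q => ((PySem.List.pyGet? x q.1).getD 0, q.2))).reverse := by
  induction l with
  | nil => intro cur keep; cases cur <;> simp [fmlB_go, selB]
  | cons q t ih =>
      intro cur keep
      obtain ⟨i, yi⟩ := q
      cases cur with
      | none => simp [fmlB_go, selB, ih]
      | some c =>
          by_cases h : yi ≤ c
          · simp [fmlB_go, selB, h, ih]
          · simp [fmlB_go, selB, h, ih]

-- selection commutes with a snd-preserving map
theorem selA_map {α β : Type} (f : α × Int → β × Int) (hf : ∀ p, (f p).2 = p.2)
    (l : List (α × Int)) : selA (l.map f) = (selA l).map f := by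
  induction l with
  | nil => rfl
  | cons q t ih =>
      have hall : ((t.map f).all fun r => (f q).2 ≤ r.2) = (t.all fun r => q.2 ≤ r.2) := by
        simp only [List.all_map, Function.comp_def, hf]
      simp only [List.map_cons, selA, hall]
      split <;> simp [ih]

theorem enumerate_map_zip (x : List Int) : ∀ (y : List Int) (s : Nat), y.length ≤ (x.drop s).length →
    (PySem.List.enumerate y s).map (fun q => ((PySem.List.pyGet? x q.1).getD 0, q.2)) =
      (x.drop s).zip y := by
  intro y
  induction y with
  | nil => intro s _; simp [PySem.List.enumerate]
  | cons b u ih =>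
      intro s hlen
      cases hd : x.drop s with
      | nil => rw [hd] at hlen; simp at hlen
      | cons a t =>
          have hxs : x[s]? = some a := by
            have h0 : (x.drop s)[0]? = some a := by rw [hd]; rfl
            rw [List.getElem?_drop] at h0; simpa using h0
          have hget : (PySem.List.pyGet? x ((s : Int))).getD 0 = a := by
            rw [PySem.List.pyGet?_natCast, hxs]; rfl
          have ht : x.drop (s + 1) = t := by
            have := congrArg List.tail hd; simpa using this
          have hlen' : u.length ≤ (x.drop (s + 1)).length := by
            rw [ht]; rw [hd] at hlen; simpa using hlen
          rw [PySem.List.enumerate_cons]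
          simp only [List.map_cons, hget]
          rw [show ((s : Int) + 1) = ((s + 1 : Nat) : Int) by push_cast; ring]
          rw [ih (s + 1) hlen', ht, List.zip_cons_cons]

theorem alt_eq_selA (x y : List Int) (h : y.length ≤ x.length) :
    find_monotone_lower_fit_alt x y =
      ((selA (x.zip y)).map Prod.fst, (selA (x.zip y)).map Prod.snd) := by
  have henum : (PySem.List.enumerate y 0).map
      (fun q => ((PySem.List.pyGet? x q.1).getD 0, q.2)) = x.zip y := by
    have := enumerate_map_zip x y 0 (by simpa using h)
    simpa using this
  show ((fmlB_go x none [] (PySem.List.enumerate y).reverse).map Prod.fst,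
        (fmlB_go x none [] (PySem.List.enumerate y).reverse).map Prod.snd) = _
  rw [fmlB_go_eq, selB_none_reverse]
  simp only [List.nil_append, List.map_reverse, List.reverse_reverse]
  rw [← selA_map (fun q => ((PySem.List.pyGet? x q.1).getD 0, q.2)) (fun p => rfl), henum]

theorem zip_all_snd (e : Int) : ∀ (xs ys : List Int), ys.length ≤ xs.length →
    ((xs.zip ys).all (fun r => e ≤ r.2)) = ys.all (fun b => e ≤ b) := by
  intro xs
  induction xs with
  | nil => intro ys h; cases ys <;> simp_all
  | cons a t ih =>
      intro ys h
      cases ys with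
      | nil => simp
      | cons b u => simp_all [List.zip_cons_cons]

theorem fmlA_go_eq (x y : List Int) : ∀ (ys xs : List Int) (i : Nat),
    y.drop i = ys → x.drop i = xs → ys.length ≤ xs.length → ∀ acc,
    fmlA_go x y (fmlEnum i ys) acc =
      (acc.1 ++ (selA (xs.zip ys)).map Prod.fst, acc.2 ++ (selA (xs.zip ys)).map Prod.snd) := by
  intro ys
  induction ys with
  | nil => intro xs i _ _ _ acc; simp [fmlEnum, fmlA_go, selA]
  | cons e ys' ih =>
      intro xs i hy hx hlen acc
      cases xs with
      | nil => simp at hlen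
      | cons a xs' =>
          have hyi : y[i]? = some e := by
            have h0 : (y.drop i)[0]? = some e := by rw [hy]; rfl
            rw [List.getElem?_drop] at h0; simpa using h0
          have hxi : x[i]? = some a := by
            have h0 : (x.drop i)[0]? = some a := by rw [hx]; rfl
            rw [List.getElem?_drop] at h0; simpa using h0
          have hy' : y.drop (i + 1) = ys' := by
            have := congrArg List.tail hy; simpa using this
          have hx' : x.drop (i + 1) = xs' := by
            have := congrArg List.tail hx; simpa using this
          have hlen' : ys'.length ≤ xs'.length := by simpa using hlen
          have hget_y : (PySem.List.pyGet? y (i : Int)).getD 0 = e := by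
            rw [PySem.List.pyGet?_natCast, hyi]; rfl
          have hget_x : (PySem.List.pyGet? x (i : Int)).getD 0 = a := by
            rw [PySem.List.pyGet?_natCast, hxi]; rfl
          simp only [fmlEnum, fmlA_go, hy, fmlA_inner_eq, List.all_cons, le_refl,
            decide_true, Bool.true_and]
          rw [List.zip_cons_cons]
          simp only [selA]
          rw [show ((xs'.zip ys').all fun r => e ≤ r.2) = ys'.all (fun b => e ≤ b) from
            zip_all_snd e xs' ys' hlen']
          by_cases hall : ys'.all (fun b => e ≤ b)
          · simp only [hall, hget_x, hget_y]
            rw [ih xs' (i + 1) hy' hx' hlen']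
            simp
          · simp only [hall, Bool.false_eq_true, if_false]
            rw [ih xs' (i + 1) hy' hx' hlen']

theorem a_eq_selA (x y : List Int) (h : y.length ≤ x.length) :
    find_monotone_lower_fit x y = ((selA (x.zip y)).map Prod.fst, (selA (x.zip y)).map Prod.snd) := by
  rw [find_monotone_lower_fit, fmlA_go_eq x y y x 0 (by simp) (by simp) h ([], [])]
  simp

-- ===== VERDICT =====
theorem find_monotone_lower_fit_spec : Claim_equal_find_monotone_lower_fit := by
  intro x y _ hpre
  unfold Spec_find_monotone_lower_fit
  rcases hpre with h | h
  · subst h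
    simp [find_monotone_lower_fit, find_monotone_lower_fit_alt, fmlEnum, fmlA_go, fmlB_go,
      PySem.List.enumerate]
  · rw [a_eq_selA x y h, alt_eq_selA x y h]
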